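-- pv_equiv track=rewrite | github.com/gangrel2321/GoToSleep | command.py | _process_cmd_string
-- ===== SOURCE A (Python) =====
-- from typing import Dict, List, Tuple, overload
--
-- def _process_cmd_string(
--     cmd_string: str, variable_args: List[int]
-- ) -> List[Tuple[str, bool]]:
--     string_list: List[str] = cmd_string.split(" ")
--     result = [
--         (string_list[i], False) if i in variable_args else (string_list[i], True)
--         for i in range(len(string_list))
--     ]
--     return result
-- ===== SOURCE B (Python) =====
-- from typing import List, Tuple
--
-- def _process_cmd_string(
--     cmd_string: str, variable_args: List[int]
-- ) -> List[Tuple[str, bool]]: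
--     tokens = cmd_string.split(" ")
--     result = [(t, True) for t in tokens]
--     for i in variable_args:
--         if 0 <= i < len(tokens):
--             result[i] = (tokens[i], False)
--     return result
-- ===== Notes on version B (the rewrite author's own statement) =====
-- stated objective: alternative
-- what changed: Instead of testing every token index for membership in variable_args, B builds the all-True list in one pass and then overwrites only the in-range variable positions (build-then-mark), a differently shaped traversal.
import Mathlib
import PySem

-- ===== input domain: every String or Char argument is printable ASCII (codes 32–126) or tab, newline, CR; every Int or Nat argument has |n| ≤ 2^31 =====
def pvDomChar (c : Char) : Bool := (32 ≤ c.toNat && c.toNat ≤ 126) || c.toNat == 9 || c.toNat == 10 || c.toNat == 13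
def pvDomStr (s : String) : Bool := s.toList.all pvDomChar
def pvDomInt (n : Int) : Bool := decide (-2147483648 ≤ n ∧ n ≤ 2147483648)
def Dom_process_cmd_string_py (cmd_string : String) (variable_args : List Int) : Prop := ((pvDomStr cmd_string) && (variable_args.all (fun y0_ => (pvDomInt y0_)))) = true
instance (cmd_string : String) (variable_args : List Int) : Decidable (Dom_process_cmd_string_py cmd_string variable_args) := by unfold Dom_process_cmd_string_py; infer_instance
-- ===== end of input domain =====

-- B builds the all-True list in one pass and then overwrites only the in-range variable positions (no per-token membership scan).

-- ===== PORT A =====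
def process_cmd_string_py (cmd_string : String) (variable_args : List Int) : List (String × Bool) :=
  let string_list := (PySem.Str.split? cmd_string " ").getD []
  (PySem.List.pyRange 0 string_list.length 1).map (fun i =>
    if i ∈ variable_args then (PySem.List.pyGetD string_list i "", false)
    else (PySem.List.pyGetD string_list i "", true))

-- ===== PORT B =====
def process_cmd_string_py_alt (cmd_string : String) (variable_args : List Int) : List (String × Bool) :=
  let tokens := (PySem.Str.split? cmd_string " ").getD []
  let result := tokens.map (fun t => (t, true))
  variable_args.foldl (fun acc i =>
    if 0 ≤ i ∧ i < (tokens.length : Int) then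
      PySem.List.pySetD acc i (PySem.List.pyGetD tokens i "", false)
    else acc) result

-- ===== PRECONDITION & SPEC =====
def Spec_process_cmd_string_py (cmd_string : String) (variable_args : List Int) (out : List (String × Bool)) : Prop := out = process_cmd_string_py_alt cmd_string variable_args
instance (cmd_string : String) (variable_args : List Int) (out : List (String × Bool)) : Decidable (Spec_process_cmd_string_py cmd_string variable_args out) := by unfold Spec_process_cmd_string_py; infer_instance

-- ===== CLAIM (what is proved, stated in full; the proofs are below) =====
def Claim_equal_process_cmd_string_py : Prop := ∀ (cmd_string : String) (variable_args : List Int), Dom_process_cmd_string_py cmd_string variable_args → Spec_process_cmd_string_py cmd_string variable_args (process_cmd_string_py cmd_string variable_args)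

-- ===== LEMMAS AND PROOFS =====

-- The mark-loop invariant: after folding the overwrites over vs, position k holds
-- (tokens[k], false) iff ↑k ∈ vs, and is otherwise left as in acc.
theorem foldl_mark_getElem? (tokens : List String) (vs : List Int)
    (acc : List (String × Bool)) (hlen : acc.length = tokens.length) (k : Nat) :
    (vs.foldl (fun acc i =>
      if 0 ≤ i ∧ i < (tokens.length : Int) then
        PySem.List.pySetD acc i (PySem.List.pyGetD tokens i "", false)
      else acc) acc)[k]? =
    if (k : Int) ∈ vs ∧ k < tokens.length then some (tokens[k]!, false) else acc[k]? := by
  induction vs generalizing acc with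
  | nil => simp
  | cons v vs ih =>
    simp only [List.foldl_cons]
    by_cases hg : 0 ≤ v ∧ v < (tokens.length : Int)
    · rw [if_pos hg]
      rw [ih _ (by simp [PySem.List.pySetD_of_nonneg _ _ hg.1, hlen])]
      by_cases hmem : (k : Int) ∈ vs ∧ k < tokens.length
      · rw [if_pos hmem, if_pos ⟨List.mem_cons_of_mem _ hmem.1, hmem.2⟩]
      · rw [if_neg hmem]
        by_cases hvk : v = (k : Int)
        · subst hvk
          have hk : k < tokens.length := by exact_mod_cast hg.2
          rw [if_pos ⟨List.mem_cons_self, hk⟩]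
          rw [PySem.List.pySetD_of_nonneg _ _ hg.1]
          simp only [Int.toNat_natCast]
          rw [List.getElem?_set_self (by omega)]
          have : PySem.List.pyGetD tokens (k : Int) "" = tokens[k]! := by
            rw [PySem.List.pyGetD_natCast]
            simp [List.getD, List.getElem!_eq_getElem?_getD, List.getElem?_eq_getElem hk]
          rw [this]
        · have : ¬ ((k : Int) ∈ v :: vs ∧ k < tokens.length) := by
            intro ⟨hm, hk⟩
            rcases List.mem_cons.mp hm with h | h
            · exact hvk h.symm
            · exact hmem ⟨h, hk⟩
          rw [if_neg this]
          rw [PySem.List.pySetD_of_nonneg _ _ hg.1]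
          rw [List.getElem?_set_ne (by omega)]
    · rw [if_neg hg, ih _ hlen]
      by_cases hmem : (k : Int) ∈ vs ∧ k < tokens.length
      · rw [if_pos hmem, if_pos ⟨List.mem_cons_of_mem _ hmem.1, hmem.2⟩]
      · rw [if_neg hmem]
        have : ¬ ((k : Int) ∈ v :: vs ∧ k < tokens.length) := by
          intro ⟨hm, hk⟩
          rcases List.mem_cons.mp hm with h | h
          · exact hg ⟨by omega, by subst h; exact_mod_cast hk⟩
          · exact hmem ⟨h, hk⟩
        rw [if_neg this]

-- ===== VERDICT (by name: the statement is the Claim_ definition above) =====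
theorem process_cmd_string_py_spec : Claim_equal_process_cmd_string_py := by
  intro cmd_string variable_args _
  unfold Spec_process_cmd_string_py process_cmd_string_py process_cmd_string_py_alt
  set tokens := (PySem.Str.split? cmd_string " ").getD [] with htok
  apply List.ext_getElem?
  intro k
  rw [foldl_mark_getElem? tokens variable_args _ (by simp)]
  by_cases hk : k < tokens.length
  · rw [List.getElem?_map, List.getElem?_eq_getElem (l := PySem.List.pyRange 0 tokens.length 1)
      (by rw [PySem.List.length_pyRange_one]; omega)]
    rw [PySem.List.getElem_pyRange_one]
    simp only [Option.map_some, zero_add]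
    have hget : PySem.List.pyGetD tokens (k : Int) "" = tokens[k]! := by
      rw [PySem.List.pyGetD_natCast]
      simp [List.getD, List.getElem!_eq_getElem?_getD, List.getElem?_eq_getElem hk]
    by_cases hmem : (k : Int) ∈ variable_args
    · rw [if_pos hmem, if_pos ⟨hmem, hk⟩, hget]
    · rw [if_neg hmem, if_neg (by intro h; exact hmem h.1), hget,
        List.getElem?_map, List.getElem?_eq_getElem hk]
      simp [List.getElem!_eq_getElem?_getD, List.getElem?_eq_getElem hk]
  · rw [if_neg (by intro h; exact hk h.2)]
    rw [List.getElem?_eq_none (by simp [PySem.List.length_pyRange_one]; omega),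
        List.getElem?_eq_none (by simp; omega)]
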